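-- pv_equiv track=rewrite | github.com/olcf/olcf-test-harness-examples | frontier/lammps/Source/Common_Scripts/find_n_close_factors.py | get_n_factors
-- ===== SOURCE A (Python) =====
-- def get_n_factors(factors, n_fact):
--     # helper method
--     def find_min_pos(factors_n):
--         min_pos = 0
--         pos = 0
--         while pos < len(factors_n):
--             if factors_n[pos] < factors_n[min_pos]:
--                 min_pos = pos
--             pos += 1
--         return min_pos
--     # assume largest factors are at the end, since list is reverse-sorted
--     index = len(factors) - 1
--     factors_n = [1] * n_fact
--     while index >= 0:
--         to_mult = find_min_pos(factors_n)
--         factors_n[to_mult] = factors_n[to_mult] * factors[index]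
--         index -= 1
--     return factors_n
-- ===== SOURCE B (Python) =====
-- def get_n_factors(factors, n_fact):
--     # Keep the buckets as a list of (value, original_index) pairs maintained in
--     # sorted (lexicographic) order: the minimum bucket is always at the front,
--     # so the inner minimum scan disappears; after one sorted re-insertion per
--     # factor, scatter the values back to their original positions.
--     buckets = [(1, i) for i in range(n_fact)]
--     for f in reversed(factors):
--         v, i = buckets.pop(0)
--         item = (v * f, i)
--         j = 0
--         while j < len(buckets) and buckets[j] < item:
--             j += 1
--         buckets.insert(j, item)
--     out = [0] * max(n_fact, 0)
--     for v, i in buckets: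
--         out[i] = v
--     return out
-- ===== Notes on version B (the rewrite author's own statement) =====
-- stated objective: alternative
-- what changed: B keeps the buckets as a (value, index) list maintained in sorted order, so the minimum bucket is always at the front and re-insertion replaces A's full minimum scan; values are scattered back to their original positions at the end.
import Mathlib
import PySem

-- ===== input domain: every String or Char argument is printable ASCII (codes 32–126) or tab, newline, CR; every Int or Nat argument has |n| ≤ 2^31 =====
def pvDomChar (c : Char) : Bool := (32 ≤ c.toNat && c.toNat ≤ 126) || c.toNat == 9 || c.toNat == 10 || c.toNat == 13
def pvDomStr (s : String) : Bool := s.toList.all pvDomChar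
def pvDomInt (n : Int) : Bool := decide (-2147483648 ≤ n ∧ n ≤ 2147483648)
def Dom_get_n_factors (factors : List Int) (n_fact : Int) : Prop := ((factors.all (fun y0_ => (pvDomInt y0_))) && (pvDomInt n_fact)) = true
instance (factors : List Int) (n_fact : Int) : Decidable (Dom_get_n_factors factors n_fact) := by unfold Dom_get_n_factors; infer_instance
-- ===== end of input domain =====

-- B keeps the buckets as a (value, index) list maintained in sorted order, so the minimum
-- bucket is always at the front (no minimum scan); same return value as A on Pre_.

-- ===== PORT A =====
-- find_min_pos: the while loop over pos = 0..len-1 with the min_pos accumulator,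
-- as a fold over range(len); indices are always in range, so getD is exact.
def findMinPosA (l : List Int) : Nat :=
  (List.range l.length).foldl (fun mp pos => if l.getD pos 0 < l.getD mp 0 then pos else mp) 0

-- the outer while loop: index = len(factors)-1 down to 0, i.e. one step per
-- element of factors.reverse, with the factors_n list as the loop state
def loopGNF : List Int → List Int → List Int
  | [], fn => fn
  | f :: rest, fn => loopGNF rest (fn.set (findMinPosA fn) (fn.getD (findMinPosA fn) 0 * f))

def get_n_factors (factors : List Int) (n_fact : Int) : List Int :=
  loopGNF factors.reverse (List.replicate n_fact.toNat 1)

-- ===== PORT B =====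
-- Python tuple comparison (v, i) < (v', i') on int pairs
def pairLt (a b : Int × Int) : Bool := a.1 < b.1 || (a.1 == b.1 && a.2 < b.2)

-- the j-scan + buckets.insert(j, item): skip the elements < item, put item there
def insertPair (x : Int × Int) : List (Int × Int) → List (Int × Int)
  | [] => [x]
  | y :: ys => if pairLt y x then y :: insertPair x ys else x :: y :: ys

-- for f in reversed(factors): pop the front (the minimum), re-insert sorted.
-- The [] case is Python's IndexError on buckets.pop(0); excluded by Pre_.
def loopGNFB : List Int → List (Int × Int) → List (Int × Int)
  | [], bs => bs
  | f :: rest, bs =>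
    match bs with
    | [] => []
    | (v, i) :: tail => loopGNFB rest (insertPair (v * f, i) tail)

def get_n_factors_alt (factors : List Int) (n_fact : Int) : List Int :=
  let bs := loopGNFB factors.reverse ((List.range n_fact.toNat).map (fun (i : Nat) => ((1 : Int), (i : Int))))
  -- out = [0] * max(n_fact, 0); out[i] = v for each pair (indices are in range, toNat exact)
  bs.foldl (fun out p => out.set p.2.toNat p.1) (List.replicate n_fact.toNat 0)

-- ===== PRECONDITION & SPEC =====
-- Pre_ excludes exactly the inputs where A raises IndexError (n_fact ≤ 0 with
-- nonempty factors: factors_n is empty and factors_n[0] fails); B raises there too.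
def Pre_get_n_factors (factors : List Int) (n_fact : Int) : Prop := factors = [] ∨ 1 ≤ n_fact
instance (factors : List Int) (n_fact : Int) : Decidable (Pre_get_n_factors factors n_fact) := by unfold Pre_get_n_factors; infer_instance

def pvWitness_get_n_factors : List Int × Int := ([6, 3, 2], 2)

def Spec_get_n_factors (factors : List Int) (n_fact : Int) (out : List Int) : Prop := out = get_n_factors_alt factors n_fact
instance (factors : List Int) (n_fact : Int) (out : List Int) : Decidable (Spec_get_n_factors factors n_fact out) := by unfold Spec_get_n_factors; infer_instance

-- ===== CLAIM (what is proved, stated in full; the proofs are below) =====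
def Claim_equal_get_n_factors : Prop := ∀ (factors : List Int) (n_fact : Int), Dom_get_n_factors factors n_fact → Pre_get_n_factors factors n_fact → Spec_get_n_factors factors n_fact (get_n_factors factors n_fact)

-- ===== LEMMAS AND PROOFS =====

-- the (non-strict) order insertPair maintains, as a Prop
def pLe (a b : Int × Int) : Prop := a.1 < b.1 ∨ (a.1 = b.1 ∧ a.2 ≤ b.2)

theorem pLe_refl (a : Int × Int) : pLe a a := by unfold pLe; omega

theorem pLe_trans {a b c : Int × Int} (h₁ : pLe a b) (h₂ : pLe b c) : pLe a c := by
  unfold pLe at *; omega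

theorem pLe_antisymm {a b : Int × Int} (h₁ : pLe a b) (h₂ : pLe b a) : a = b := by
  unfold pLe at *
  obtain ⟨a1, a2⟩ := a; obtain ⟨b1, b2⟩ := b
  simp only [Prod.mk.injEq]
  constructor <;> omega

theorem pairLt_false_iff {a b : Int × Int} : pairLt a b = false ↔ pLe b a := by
  unfold pairLt pLe
  simp only [Bool.or_eq_false_iff, Bool.and_eq_false_iff, decide_eq_false_iff_not, not_lt,
    beq_eq_false_iff_ne, ne_eq]
  constructor
  · rintro ⟨h1, h2 | h2⟩ <;> omega
  · intro h
    constructor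
    · omega
    · by_cases he : a.1 = b.1
      · right; omega
      · left; exact he

theorem pairLt_true_le {a b : Int × Int} (h : pairLt a b = true) : pLe a b := by
  unfold pairLt at h; unfold pLe
  simp only [Bool.or_eq_true, Bool.and_eq_true, decide_eq_true_eq, beq_iff_eq] at h
  omega

-- enumerate with Int indices starting at k
def enumI : Int → List Int → List (Int × Int)
  | _, [] => []
  | k, v :: vs => (v, k) :: enumI (k + 1) vs

theorem enumI_length : ∀ (k : Int) (l : List Int), (enumI k l).length = l.length
  | _, [] => rfl
  | k, _ :: vs => by simp [enumI, enumI_length (k + 1) vs]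

theorem enumI_getElem : ∀ (l : List Int) (k : Int) (j : Nat) (h : j < l.length),
    (enumI k l)[j]'(by rw [enumI_length]; exact h) = (l[j], k + j)
  | v :: vs, k, 0, h => by simp [enumI]
  | v :: vs, k, j + 1, h => by
      simp only [enumI, List.getElem_cons_succ]
      rw [enumI_getElem vs (k + 1) j (by simpa using h)]
      congr 1
      push_cast; ring

theorem of_mem_enumI : ∀ {l : List Int} {k : Int} {p : Int × Int}, p ∈ enumI k l →
    ∃ j : Nat, ∃ h : j < l.length, p = (l[j], k + j)
  | [], _, _, h => by simp [enumI] at h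
  | v :: vs, k, p, h => by
      simp only [enumI, List.mem_cons] at h
      rcases h with h | h
      · exact ⟨0, by simp, by simpa using h⟩
      · obtain ⟨j, hj, hp⟩ := of_mem_enumI h
        refine ⟨j + 1, by simpa using hj, ?_⟩
        rw [hp]
        simp only [List.getElem_cons_succ]
        congr 1
        push_cast; ring

theorem enumI_set : ∀ (l : List Int) (k : Int) (m : Nat) (x : Int),
    enumI k (l.set m x) = (enumI k l).set m (x, k + m)
  | [], _, _, _ => rfl
  | v :: vs, k, 0, x => by simp [enumI]
  | v :: vs, k, m + 1, x => by
      show (v, k) :: enumI (k + 1) (vs.set m x) = (v, k) :: (enumI (k + 1) vs).set m (x, k + ((m : Nat) + 1 : Nat))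
      rw [enumI_set vs (k + 1) m x]
      congr 2
      push_cast; ring

-- set m x is a permutation of x consed onto the list with index m erased
theorem set_perm_cons_eraseIdx {α : Type} (l : List α) (m : Nat) (x : α) (h : m < l.length) :
    List.Perm (l.set m x) (x :: l.eraseIdx m) := by
  rw [List.set_eq_take_cons_drop x h, List.eraseIdx_eq_take_drop_succ]
  exact List.perm_middle

-- any list splits at an index
theorem eq_take_cons_drop {α : Type} (l : List α) (m : Nat) (h : m < l.length) :
    l = l.take m ++ l[m] :: l.drop (m + 1) := by
  conv_lhs => rw [← List.take_append_drop m l]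
  rw [List.getElem_cons_drop h]

-- findMinPosA returns an in-range position that is pLe-minimal among all (value, index) pairs
theorem findMinPosA_spec (l : List Int) (hl : l ≠ []) :
    findMinPosA l < l.length ∧
      ∀ p, p < l.length → pLe (l.getD (findMinPosA l) 0, (findMinPosA l : Int)) (l.getD p 0, (p : Int)) := by
  have hlen : 0 < l.length := List.length_pos_iff.mpr hl
  suffices H : ∀ t, t ≤ l.length →
      (let mp := (List.range t).foldl (fun mp pos => if l.getD pos 0 < l.getD mp 0 then pos else mp) 0
       mp < l.length ∧ mp ≤ t ∧ ∀ p, p < t → pLe (l.getD mp 0, (mp : Int)) (l.getD p 0, (p : Int))) by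
    obtain ⟨h1, _, h3⟩ := H l.length le_rfl
    exact ⟨h1, h3⟩
  intro t
  induction t with
  | zero => intro _; exact ⟨hlen, Nat.zero_le _, fun p hp => absurd hp (Nat.not_lt_zero p)⟩
  | succ t ih =>
      intro ht
      obtain ⟨h1, h2, h3⟩ := ih (Nat.le_of_succ_le ht)
      simp only [List.range_succ, List.foldl_append, List.foldl_cons, List.foldl_nil]
      set mp := (List.range t).foldl (fun mp pos => if l.getD pos 0 < l.getD mp 0 then pos else mp) 0 with hmp
      by_cases hc : l.getD t 0 < l.getD mp 0
      · simp only [if_pos hc]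
        refine ⟨ht, Nat.le_succ t, fun p hp => ?_⟩
        rcases Nat.lt_succ_iff_lt_or_eq.mp hp with hp' | hp'
        · refine pLe_trans ?_ (h3 p hp')
          show (l.getD t 0 < l.getD mp 0 ∨ _)
          exact Or.inl hc
        · subst hp'; exact pLe_refl _
      · simp only [if_neg hc]
        refine ⟨h1, Nat.le_succ_of_le h2, fun p hp => ?_⟩
        rcases Nat.lt_succ_iff_lt_or_eq.mp hp with hp' | hp'
        · exact h3 p hp'
        · subst hp'
          show l.getD mp 0 < l.getD p 0 ∨ (l.getD mp 0 = l.getD p 0 ∧ (mp : Int) ≤ (p : Int))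
          simp only [not_lt] at hc
          omega

-- inserting keeps the permutation
theorem insertPair_perm (x : Int × Int) : ∀ (l : List (Int × Int)), List.Perm (insertPair x l) (x :: l)
  | [] => List.Perm.refl _
  | y :: ys => by
      unfold insertPair
      by_cases h : pairLt y x = true
      · simp only [if_pos h]
        exact ((insertPair_perm x ys).cons y).trans (List.Perm.swap x y ys)
      · simp only [if_neg h]
        exact List.Perm.refl _

-- inserting keeps sortedness
theorem insertPair_sorted (x : Int × Int) :
    ∀ {l : List (Int × Int)}, l.Pairwise pLe → (insertPair x l).Pairwise pLe
  | [], _ => by simp [insertPair]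
  | y :: ys, h => by
      obtain ⟨hy, hys⟩ := List.pairwise_cons.mp h
      unfold insertPair
      by_cases hc : pairLt y x = true
      · simp only [if_pos hc]
        refine List.pairwise_cons.mpr ⟨fun z hz => ?_, insertPair_sorted x hys⟩
        have := (insertPair_perm x ys).mem_iff.mp hz
        rcases List.mem_cons.mp this with hz' | hz'
        · subst hz'; exact pairLt_true_le hc
        · exact hy z hz'
      · simp only [if_neg hc]
        have hf : pairLt y x = false := by simpa using hc
        have hxy : pLe x y := pairLt_false_iff.mp hf
        refine List.pairwise_cons.mpr ⟨fun z hz => ?_, h⟩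
        rcases List.mem_cons.mp hz with hz' | hz'
        · subst hz'; exact hxy
        · exact pLe_trans hxy (hy z hz')

theorem loopGNF_nil : ∀ (fs : List Int), loopGNF fs [] = []
  | [] => rfl
  | f :: rest => by simp only [loopGNF, List.set_nil]; exact loopGNF_nil rest

-- the head of a sorted permutation of enumI 0 fn is exactly A's chosen minimum bucket
theorem head_eq (fn : List Int) (bs : List (Int × Int)) (hne : fn ≠ [])
    (hperm : List.Perm bs (enumI 0 fn)) (hsort : bs.Pairwise pLe) :
    ∃ tail, bs = (fn.getD (findMinPosA fn) 0, (findMinPosA fn : Int)) :: tail ∧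
      List.Perm tail ((enumI 0 fn).eraseIdx (findMinPosA fn)) := by
  obtain ⟨hm, hmin⟩ := findMinPosA_spec fn hne
  set m := findMinPosA fn with hmdef
  have hbs_ne : bs ≠ [] := by
    intro h
    rw [h] at hperm
    have := hperm.length_eq
    rw [enumI_length] at this
    simp at this
    exact hne (List.length_eq_zero_iff.mp this.symm)
  obtain ⟨h, tail, rfl⟩ := List.exists_cons_of_ne_nil hbs_ne
  have hmem_e : (fn.getD m 0, (m : Int)) ∈ enumI 0 fn := by
    have hg : fn.getD m 0 = fn[m] := List.getD_eq_getElem fn 0 hm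
    have hmem : (enumI 0 fn)[m]'(by rw [enumI_length]; exact hm) ∈ enumI 0 fn :=
      List.getElem_mem _
    rw [enumI_getElem fn 0 m hm] at hmem
    rw [hg]
    simpa using hmem
  have hmem_bs : (fn.getD m 0, (m : Int)) ∈ h :: tail := hperm.mem_iff.mpr hmem_e
  have hh_mem : h ∈ enumI 0 fn := hperm.mem_iff.mp (List.mem_cons_self)
  obtain ⟨j, hj, hpj⟩ := of_mem_enumI hh_mem
  -- h ≤ the minimum pair, and the minimum pair ≤ h, hence equal
  have h1 : pLe h (fn.getD m 0, (m : Int)) := by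
    rcases List.mem_cons.mp hmem_bs with he | he
    · rw [← he]; exact pLe_refl _
    · exact (List.pairwise_cons.mp hsort).1 _ he
  have h2 : pLe (fn.getD m 0, (m : Int)) h := by
    rw [hpj]
    have h3 := hmin j hj
    rw [List.getD_eq_getElem fn 0 hj] at h3
    simpa using h3
  have hh : h = (fn.getD m 0, (m : Int)) := pLe_antisymm h1 h2
  refine ⟨tail, by rw [hh], ?_⟩
  -- enumI 0 fn = take m ++ h :: drop (m+1); peel h from both sides of the permutation
  have heq : enumI 0 fn =
      (enumI 0 fn).take m ++ (enumI 0 fn)[m]'(by rw [enumI_length]; exact hm) :: (enumI 0 fn).drop (m + 1) :=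
    eq_take_cons_drop _ m (by rw [enumI_length]; exact hm)
  have hgm : (enumI 0 fn)[m]'(by rw [enumI_length]; exact hm) = h := by
    rw [enumI_getElem fn 0 m hm, hh, List.getD_eq_getElem fn 0 hm]
    simp
  rw [hgm] at heq
  have hmid : List.Perm ((enumI 0 fn).take m ++ h :: (enumI 0 fn).drop (m + 1))
      (h :: ((enumI 0 fn).take m ++ (enumI 0 fn).drop (m + 1))) := List.perm_middle
  have hperm2 := hperm.trans (heq.symm ▸ hmid)
  have := hperm2.cons_inv
  rwa [← List.eraseIdx_eq_take_drop_succ] at this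

-- main loop invariant: B's bucket list stays a sorted permutation of A's enumerated state
theorem loop_inv : ∀ (fs fn : List Int) (bs : List (Int × Int)),
    List.Perm bs (enumI 0 fn) → bs.Pairwise pLe →
    List.Perm (loopGNFB fs bs) (enumI 0 (loopGNF fs fn)) ∧ (loopGNFB fs bs).Pairwise pLe
  | [], fn, bs, hperm, hsort => ⟨hperm, hsort⟩
  | f :: rest, fn, bs, hperm, hsort => by
      by_cases hfn : fn = []
      · subst hfn
        have hbs : bs = [] := by
          have := hperm.length_eq
          simp [enumI] at this
          exact this
        subst hbs
        simp only [loopGNFB, loopGNF, List.set_nil, loopGNF_nil, enumI]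
        exact ⟨List.Perm.refl _, List.Pairwise.nil⟩
      · obtain ⟨tail, hbs, htail⟩ := head_eq fn bs hfn hperm hsort
        obtain ⟨hm, _⟩ := findMinPosA_spec fn hfn
        set m := findMinPosA fn with hmdef
        subst hbs
        simp only [loopGNFB, loopGNF]
        apply loop_inv rest
        · -- permutation is preserved through the pop + sorted insert
          have hstep : List.Perm (enumI 0 (fn.set m (fn.getD m 0 * f)))
              ((fn.getD m 0 * f, (m : Int)) :: (enumI 0 fn).eraseIdx m) := by
            rw [enumI_set fn 0 m _]
            have := set_perm_cons_eraseIdx (enumI 0 fn) m (fn.getD m 0 * f, (0 : Int) + m)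
              (by rw [enumI_length]; exact hm)
            simpa using this
          exact ((insertPair_perm _ tail).trans (htail.cons _)).trans hstep.symm
        · exact insertPair_sorted _ (List.pairwise_cons.mp hsort).2

-- (pre ++ [v]).set pre.length v : setting just past a prefix
theorem set_append_cons {α : Type} : ∀ (pre : List α) (y v : α) (rest : List α),
    (pre ++ y :: rest).set pre.length v = pre ++ v :: rest
  | [], _, _, _ => rfl
  | a :: pre, y, v, rest => by
      simp only [List.cons_append, List.length_cons, List.set_cons_succ]
      rw [set_append_cons pre y v rest]

-- scattering the enumeration of fn (indices starting at pre.length) fills exactly fn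
theorem scatter_enum : ∀ (fn pre : List Int),
    List.foldl (fun out (p : Int × Int) => out.set p.2.toNat p.1)
      (pre ++ List.replicate fn.length 0) (enumI (pre.length : Int) fn) = pre ++ fn
  | [], pre => by simp [enumI]
  | v :: vs, pre => by
      simp only [enumI, List.foldl_cons, List.length_cons, List.replicate_succ]
      have h1 : ((pre.length : Int)).toNat = pre.length := by simp
      rw [h1, set_append_cons pre 0 v (List.replicate vs.length 0)]
      have h2 : pre ++ v :: List.replicate vs.length 0 =
          (pre ++ [v]) ++ List.replicate vs.length 0 := by simp
      have h3 : ((pre.length : Int) + 1) = ((pre ++ [v]).length : Int) := by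
        simp
      rw [h2, h3, scatter_enum vs (pre ++ [v])]
      simp

-- scattering any permutation of the enumeration also fills exactly fn
theorem scatter_perm (fn : List Int) (bs : List (Int × Int)) (hperm : List.Perm bs (enumI 0 fn)) :
    List.foldl (fun out (p : Int × Int) => out.set p.2.toNat p.1)
      (List.replicate fn.length 0) bs = fn := by
  have hcomm : ∀ x ∈ bs, ∀ y ∈ bs, ∀ (z : List Int),
      (z.set x.2.toNat x.1).set y.2.toNat y.1 = (z.set y.2.toNat y.1).set x.2.toNat x.1 := by
    intro x hx y hy z
    obtain ⟨jx, hjx, hpx⟩ := of_mem_enumI (hperm.mem_iff.mp hx)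
    obtain ⟨jy, hjy, hpy⟩ := of_mem_enumI (hperm.mem_iff.mp hy)
    by_cases hxy : jx = jy
    · subst hxy; rw [hpx, hpy]
    · rw [hpx, hpy]
      simp only [Int.zero_add]
      apply List.set_comm
      simpa using hxy
  have := List.Perm.foldl_eq' (f := fun (out : List Int) (p : Int × Int) => out.set p.2.toNat p.1)
    hperm hcomm (List.replicate fn.length 0)
  rw [this]
  have := scatter_enum fn []
  simpa using this

-- the initial bucket list is exactly enumI 0 ([1] * n)
theorem init_eq : ∀ (n : Nat) (k : Int),
    (List.range n).map (fun (i : Nat) => ((1 : Int), k + (i : Int))) = enumI k (List.replicate n 1)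
  | 0, _ => by simp [enumI]
  | n + 1, k => by
      rw [List.range_succ_eq_map, List.replicate_succ]
      simp only [List.map_cons, List.map_map, Nat.cast_zero, add_zero, enumI]
      refine congrArg₂ List.cons (by norm_num) ?_
      rw [← init_eq n (k + 1)]
      apply List.map_congr_left
      intro i _
      simp only [Function.comp_apply]
      congr 1
      push_cast; ring

-- the initial bucket list is sorted
theorem init_sorted : ∀ (n : Nat) (k : Int), (enumI k (List.replicate n 1)).Pairwise pLe
  | 0, _ => by simp [enumI]
  | n + 1, k => by
      simp only [List.replicate_succ, enumI]
      refine List.pairwise_cons.mpr ⟨fun p hp => ?_, init_sorted n (k + 1)⟩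
      obtain ⟨j, hj, hpj⟩ := of_mem_enumI hp
      rw [hpj]
      simp only [List.getElem_replicate]
      right
      constructor
      · rfl
      · simp; omega

-- loopGNF preserves the length of factors_n
theorem loopGNF_length : ∀ (fs fn : List Int), (loopGNF fs fn).length = fn.length
  | [], _ => rfl
  | f :: rest, fn => by
      simp only [loopGNF]
      rw [loopGNF_length rest]
      exact List.length_set ..

-- ===== VERDICT (by name: the statement is the Claim_ definition above) =====
theorem get_n_factors_spec : Claim_equal_get_n_factors := by
  intro factors n_fact _ _
  unfold Spec_get_n_factors get_n_factors get_n_factors_alt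
  set n := n_fact.toNat with hn
  have hinit : (List.range n).map (fun (i : Nat) => ((1 : Int), (i : Int))) = enumI 0 (List.replicate n 1) := by
    have := init_eq n 0
    simpa using this
  obtain ⟨hperm, _⟩ := loop_inv factors.reverse (List.replicate n 1)
    ((List.range n).map (fun (i : Nat) => ((1 : Int), (i : Int))))
    (hinit ▸ List.Perm.refl _) (hinit ▸ init_sorted n 0)
  have hlen : (loopGNF factors.reverse (List.replicate n 1)).length = n := by
    rw [loopGNF_length]; simp
  have := scatter_perm (loopGNF factors.reverse (List.replicate n 1)) _ hperm
  rw [hlen] at this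
  exact this.symm
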